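-- pv_equiv track=rewrite | github.com/hyunsooryu/Algorithm | BASIC_OF_ALGORITHM/What_is_Algorithm/190319[NO_1]_Find_K.py | findKth
-- ===== SOURCE A (Python) =====
-- def findKth(myInput, k) :
--     result = []
--     tmp = []
--     size = len(myInput)
--     for i in range(0, size):
--         if i < k - 1:
--             result.append(-1)
--             tmp.append(myInput[i])
--         else:
--             tmp.append(myInput[i])
--             tmp.sort()
--             result.append(tmp[k - 1])
--     return result
-- ===== SOURCE B (Python) =====
-- def findKth(myInput, k):
--     n = len(myInput)
--     if k > n:
--         return [-1] * n
--     top = []          # ascending list of the k smallest elements seen so far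
--     result = []
--     for x in myInput:
--         # binary search for the first position whose element is > x
--         lo, hi = 0, len(top)
--         while lo < hi:
--             mid = (lo + hi) // 2
--             if top[mid] <= x:
--                 lo = mid + 1
--             else:
--                 hi = mid
--         top.insert(lo, x)
--         if len(top) > k:
--             top.pop()
--         if len(top) == k:
--             result.append(top[-1])
--         else:
--             result.append(-1)
--     return result
-- ===== Notes on version B (the rewrite author's own statement) =====
-- stated objective: alternative
-- what changed: Instead of appending to and fully re-sorting the whole growing prefix at every step and indexing it, B maintains only a sorted buffer of the k smallest elements seen so far, updated by binary-search insertion plus dropping the largest, and returns [-1]*n immediately when k > n.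
-- outside the precondition, e.g. on findKth([2, 1], 0): A returns [2, 2], B raises IndexError
import Mathlib
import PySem

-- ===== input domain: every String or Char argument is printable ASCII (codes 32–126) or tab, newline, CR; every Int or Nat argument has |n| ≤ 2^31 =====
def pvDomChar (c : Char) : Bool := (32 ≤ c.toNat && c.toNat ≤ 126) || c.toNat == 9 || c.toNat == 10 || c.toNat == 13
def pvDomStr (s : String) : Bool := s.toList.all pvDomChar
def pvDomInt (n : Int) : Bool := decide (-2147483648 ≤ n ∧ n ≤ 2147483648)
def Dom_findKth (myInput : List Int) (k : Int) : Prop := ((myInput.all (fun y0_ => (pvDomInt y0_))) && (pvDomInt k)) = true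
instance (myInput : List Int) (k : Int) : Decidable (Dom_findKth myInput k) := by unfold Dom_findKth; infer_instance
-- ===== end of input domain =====

-- B replaces re-sorting every prefix by a bounded sorted buffer of the k smallest
-- elements maintained with binary search; equivalence of the RETURN values is proved on Pre_.

-- ===== PORT A =====
-- loop body of A's `for i in range(0, size)` (state = (result, tmp), ix = (i, myInput[i]))
def stepA (k : Int) (st : List Int × List Int) (ix : Int × Int) : List Int × List Int :=
  if ix.1 < k - 1 then
    (st.1 ++ [(-1 : Int)], st.2 ++ [ix.2])
  else
    -- tmp.append(myInput[i]); tmp.sort(); result.append(tmp[k-1])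
    let tmp' := PySem.List.sorted (st.2 ++ [ix.2]) (fun a => a) false
    (st.1 ++ [PySem.List.pyGetD tmp' (k - 1) 0], tmp')

def findKth (myInput : List Int) (k : Int) : List Int :=
  ((PySem.List.pyRange 0 (PySem.List.len myInput) 1).foldl
    (fun st i => stepA k st (i, PySem.List.pyGetD myInput i 0)) ([], [])).1

-- ===== PORT B =====
-- the `while lo < hi` binary-search loop of Source B
def bsearchB (top : List Int) (x : Int) (lo hi : Nat) : Nat :=
  if lo < hi then
    let mid := (lo + hi) / 2
    if PySem.List.pyGetD top (mid : Int) 0 ≤ x then bsearchB top x (mid + 1) hi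
    else bsearchB top x lo mid
  else lo
termination_by hi - lo
decreasing_by all_goals omega

-- loop body of Source B's `for x in myInput` (state = (top, result))
def stepB (k : Int) (st : List Int × List Int) (x : Int) : List Int × List Int :=
  let top := st.1
  let lo := bsearchB top x 0 top.length
  let top1 := PySem.List.insert top (lo : Int) x
  let top2 := if (top1.length : Int) > k then top1.dropLast else top1  -- top.pop() drops the last element
  if (top2.length : Int) = k then (top2, st.2 ++ [PySem.List.pyGetD top2 (-1) 0])
  else (top2, st.2 ++ [(-1 : Int)])

def findKth_alt (myInput : List Int) (k : Int) : List Int :=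
  if k > (myInput.length : Int) then List.replicate myInput.length (-1)
  else (myInput.foldl (stepB k) ([], [])).2

-- ===== PRECONDITION & SPEC =====
-- Pre_ excludes k ≤ 0 on a nonempty list: there A's tmp[k-1] either raises IndexError
-- (k < 0) or, at k = 0, returns the prefix MAXIMUM via Python's negative-index wraparound
-- — an accidental value for "k-th smallest" — while B's own algorithm raises IndexError there.
def Pre_findKth (myInput : List Int) (k : Int) : Prop := myInput = [] ∨ 1 ≤ k
instance (myInput : List Int) (k : Int) : Decidable (Pre_findKth myInput k) := by unfold Pre_findKth; infer_instance
def pvWitness_findKth : List Int × Int := ([3, 1, 2, 1], 2)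

def Spec_findKth (myInput : List Int) (k : Int) (out : List Int) : Prop := out = findKth_alt myInput k
instance (myInput : List Int) (k : Int) (out : List Int) : Decidable (Spec_findKth myInput k out) := by unfold Spec_findKth; infer_instance

-- ===== CLAIM (what is proved, stated in full; the proofs are below) =====
def Claim_equal_findKth : Prop := ∀ (myInput : List Int) (k : Int), Dom_findKth myInput k → Pre_findKth myInput k → Spec_findKth myInput k (findKth myInput k)

-- ===== LEMMAS AND PROOFS =====

-- sorted insertion (specification of what Source B's binary-search insert achieves)
def insB : List Int → Int → List Int
  | [], x => [x]
  | y :: t, x => if y ≤ x then y :: insB t x else x :: y :: t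

lemma insB_perm (l : List Int) (x : Int) : (insB l x).Perm (x :: l) := by
  induction l with
  | nil => simp [insB]
  | cons y t ih =>
    by_cases h : y ≤ x
    · simpa [insB, h] using ((ih.cons y).trans (List.Perm.swap x y t))
    · simp [insB, h]

lemma insB_length (l : List Int) (x : Int) : (insB l x).length = l.length + 1 := by
  simpa using (insB_perm l x).length_eq

lemma insB_pairwise (l : List Int) (x : Int) (h : l.Pairwise (· ≤ ·)) :
    (insB l x).Pairwise (· ≤ ·) := by
  induction l with
  | nil => simp [insB]
  | cons y t ih =>
    rcases List.pairwise_cons.mp h with ⟨hy, ht⟩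
    by_cases hyx : y ≤ x
    · rw [show insB (y :: t) x = y :: insB t x by simp [insB, hyx]]
      refine List.pairwise_cons.mpr ⟨?_, ih ht⟩
      intro z hz
      rcases List.mem_cons.mp ((insB_perm t x).mem_iff.mp hz) with h1 | h2
      · omega
      · exact hy z h2
    · rw [show insB (y :: t) x = x :: y :: t by simp [insB, hyx]]
      refine List.pairwise_cons.mpr ⟨?_, h⟩
      intro z hz
      rcases List.mem_cons.mp hz with h1 | h2
      · omega
      · have := hy z h2; omega

lemma insB_eq_takeWhile (l : List Int) (x : Int) :
    insB l x = l.takeWhile (fun y => decide (y ≤ x)) ++ x :: l.dropWhile (fun y => decide (y ≤ x)) := by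
  induction l with
  | nil => simp [insB]
  | cons y t ih =>
    by_cases h : y ≤ x
    · simp [insB, h, List.takeWhile_cons, List.dropWhile_cons, ih]
    · simp [insB, h, List.takeWhile_cons, List.dropWhile_cons]

lemma take_insB (x : Int) : ∀ (l : List Int) (m : Nat),
    (insB (l.take m) x).take m = (insB l x).take m := by
  intro l
  induction l with
  | nil => intro m; simp
  | cons y t ih =>
    intro m
    cases m with
    | zero => simp
    | succ m' =>
      by_cases h : y ≤ x
      · simp only [List.take_succ_cons, insB, if_pos h, ih m']
      · cases m' with
        | zero => simp [insB, h]
        | succ m'' => simp [insB, h, List.take_take]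

-- inserting at a nonnegative in-range index
lemma insert_natCast (xs : List Int) (v : Int) (lo : Nat) (h : lo ≤ xs.length) :
    PySem.List.insert xs (lo : Int) v = xs.take lo ++ v :: xs.drop lo := by
  simp only [PySem.List.insert, PySem.List.sliceIndices]
  norm_num
  rw [if_neg (by omega : ¬((lo : Int) < 0))]
  rw [min_eq_left (by exact_mod_cast h)]
  simp

lemma pairwise_getD_le (l : List Int) (h : l.Pairwise (· ≤ ·)) (i j : Nat)
    (hij : i ≤ j) (hj : j < l.length) : l.getD i 0 ≤ l.getD j 0 := by
  rcases Nat.lt_or_ge i j with hlt | hge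
  · rw [List.getD_eq_getElem l 0 (by omega), List.getD_eq_getElem l 0 hj]
    exact List.pairwise_iff_getElem.mp h i j (by omega) hj hlt
  · have : i = j := by omega
    subst this; rfl

lemma bsearchB_spec (top : List Int) (x : Int) (hs : top.Pairwise (· ≤ ·)) :
    ∀ (n lo hi : Nat), hi - lo ≤ n → lo ≤ hi → hi ≤ top.length →
    (∀ j, j < lo → top.getD j 0 ≤ x) →
    (∀ j, hi ≤ j → j < top.length → x < top.getD j 0) →
    bsearchB top x lo hi ≤ top.length ∧
    (∀ j, j < bsearchB top x lo hi → top.getD j 0 ≤ x) ∧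
    (∀ j, bsearchB top x lo hi ≤ j → j < top.length → x < top.getD j 0) := by
  intro n
  induction n with
  | zero =>
    intro lo hi hn hle hhi hlo hup
    have : ¬ lo < hi := by omega
    rw [bsearchB, if_neg this]
    exact ⟨by omega, hlo, fun j hj hjl => hup j (by omega) hjl⟩
  | succ n ih =>
    intro lo hi hn hle hhi hlo hup
    rw [bsearchB]
    by_cases hlt : lo < hi
    · rw [if_pos hlt]
      simp only
      set mid := (lo + hi) / 2 with hmid
      have hmlt : mid < hi := by omega
      have hmge : lo ≤ mid := by omega
      have hmlen : mid < top.length := by omega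
      have hgd : PySem.List.pyGetD top (mid : Int) 0 = top.getD mid 0 := by
        simp [PySem.List.pyGetD_natCast]
      by_cases hc : PySem.List.pyGetD top (mid : Int) 0 ≤ x
      · rw [if_pos hc]
        refine ih (mid + 1) hi (by omega) (by omega) hhi ?_ hup
        intro j hj
        have : top.getD j 0 ≤ top.getD mid 0 := pairwise_getD_le top hs j mid (by omega) hmlen
        rw [hgd] at hc; omega
      · rw [if_neg hc]
        refine ih lo mid (by omega) (by omega) (by omega) hlo ?_
        intro j hj hjl
        have : top.getD mid 0 ≤ top.getD j 0 := pairwise_getD_le top hs mid j hj hjl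
        rw [hgd] at hc; omega
    · rw [if_neg hlt]
      exact ⟨by omega, hlo, fun j hj hjl => hup j (by omega) hjl⟩

lemma takeWhile_eq_take (x : Int) : ∀ (l : List Int) (r : Nat), r ≤ l.length →
    (∀ j, j < r → l.getD j 0 ≤ x) → (∀ j, r ≤ j → j < l.length → x < l.getD j 0) →
    l.takeWhile (fun y => decide (y ≤ x)) = l.take r := by
  intro l
  induction l with
  | nil => intro r _ _ _; simp
  | cons y t ih =>
    intro r hr hlo hup
    cases r with
    | zero =>
      have : x < y := by simpa using hup 0 (by omega) (by simp)
      have hxy : ¬ y ≤ x := by omega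
      simp [List.takeWhile_cons, hxy]
    | succ r' =>
      have hy : y ≤ x := by simpa using hlo 0 (by omega)
      rw [List.take_succ_cons, List.takeWhile_cons]
      rw [if_pos (by simpa using hy)]
      rw [ih r' (by simpa using hr) (fun j hj => by simpa using hlo (j+1) (by omega))
        (fun j hj hjl => by simpa using hup (j+1) (by omega) (by simpa using Nat.succ_lt_succ hjl))]

lemma insert_eq_insB (top : List Int) (x : Int) (hs : top.Pairwise (· ≤ ·)) :
    PySem.List.insert top ((bsearchB top x 0 top.length : Nat) : Int) x = insB top x := by
  obtain ⟨hle, hlo, hup⟩ := bsearchB_spec top x hs top.length 0 top.length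
    (by omega) (by omega) (le_refl _) (by omega) (fun j hj hjl => by omega)
  set r := bsearchB top x 0 top.length with hr
  have htw : top.takeWhile (fun y => decide (y ≤ x)) = top.take r :=
    takeWhile_eq_take x top r hle hlo hup
  have hdw : top.dropWhile (fun y => decide (y ≤ x)) = top.drop r := by
    have h1 : top.takeWhile (fun y => decide (y ≤ x)) ++ top.dropWhile (fun y => decide (y ≤ x)) = top :=
      List.takeWhile_append_dropWhile
    have h2 : top.take r ++ top.drop r = top := List.take_append_drop r top
    rw [htw] at h1
    exact List.append_cancel_left (h1.trans h2.symm)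
  rw [insert_natCast top x r hle, insB_eq_takeWhile, htw, hdw]

lemma sorted_append_singleton (p : List Int) (x : Int) :
    PySem.List.sorted (p ++ [x]) (fun a => a) false
      = insB (PySem.List.sorted p (fun a => a) false) x := by
  apply PySem.List.sorted_id_eq_of_perm_of_pairwise
  · exact (insB_perm _ x).trans
      ((((PySem.List.sorted_perm p (fun a => a) false)).cons x).trans
        (List.perm_append_singleton x p).symm)
  · exact insB_pairwise _ x (PySem.List.sorted_pairwise p (fun a => a))

lemma top2_gen (k : Int) (hk : 1 ≤ k) (s : List Int) (x : Int) (hs : s.Pairwise (· ≤ ·)) :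
    (if ((PySem.List.insert (s.take k.toNat)
            (((bsearchB (s.take k.toNat) x 0 (s.take k.toNat).length) : Nat) : Int) x).length : Int) > k
      then (PySem.List.insert (s.take k.toNat)
            (((bsearchB (s.take k.toNat) x 0 (s.take k.toNat).length) : Nat) : Int) x).dropLast
      else PySem.List.insert (s.take k.toNat)
            (((bsearchB (s.take k.toNat) x 0 (s.take k.toNat).length) : Nat) : Int) x)
      = (insB s x).take k.toNat := by
  have htop : (s.take k.toNat).Pairwise (· ≤ ·) := List.Pairwise.sublist (List.take_sublist _ _) hs
  rw [insert_eq_insB _ x htop]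
  have hlen : (insB (s.take k.toNat) x).length = (s.take k.toNat).length + 1 := insB_length _ _
  by_cases hp : k.toNat ≤ s.length
  · have hl : (s.take k.toNat).length = k.toNat := by simp [hp]
    have hcond : ((insB (s.take k.toNat) x).length : Int) > k := by rw [hlen, hl]; omega
    rw [if_pos hcond, List.dropLast_eq_take, hlen, hl]
    simp only [Nat.add_sub_cancel]
    exact take_insB x s k.toNat
  · have htake : s.take k.toNat = s := List.take_of_length_le (by omega)
    have hcond : ¬ ((insB (s.take k.toNat) x).length : Int) > k := by
      rw [hlen, htake]; omega
    rw [if_neg hcond, htake]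
    exact (List.take_of_length_le (by rw [insB_length]; omega)).symm

lemma stepB_eval (k : Int) (hk : 1 ≤ k) (p res : List Int) (x : Int) :
    stepB k ((PySem.List.sorted p (fun a => a) false).take k.toNat, res) x
      = ((PySem.List.sorted (p ++ [x]) (fun a => a) false).take k.toNat,
         if (p.length : Int) < k - 1 then res ++ [(-1 : Int)]
         else res ++ [PySem.List.pyGetD (PySem.List.sorted (p ++ [x]) (fun a => a) false) (k - 1) 0]) := by
  have hsp := PySem.List.sorted_pairwise p (fun a => a)
  have htop2 := top2_gen k hk (PySem.List.sorted p (fun a => a) false) x hsp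
  rw [← sorted_append_singleton] at htop2
  simp only [stepB]
  rw [htop2]
  have hlens' : (PySem.List.sorted (p ++ [x]) (fun a => a) false).length = p.length + 1 := by
    simpa using (PySem.List.sorted_perm (p ++ [x]) (fun a => a) false).length_eq
  by_cases hc : (p.length : Int) < k - 1
  · have hne : ¬ (((PySem.List.sorted (p ++ [x]) (fun a => a) false).take k.toNat).length : Int) = k := by
      simp [hlens']; omega
    rw [if_neg hne, if_pos hc]
  · have hlen2 : ((PySem.List.sorted (p ++ [x]) (fun a => a) false).take k.toNat).length = k.toNat := by
      simp [hlens']; omega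
    have heq : (((PySem.List.sorted (p ++ [x]) (fun a => a) false).take k.toNat).length : Int) = k := by
      rw [hlen2]; omega
    rw [if_pos heq, if_neg hc]
    congr 2
    have hne : (PySem.List.sorted (p ++ [x]) (fun a => a) false).take k.toNat ≠ [] := by
      intro h; rw [h] at hlen2; simp at hlen2; omega
    rw [PySem.List.pyGetD_neg_one _ _ hne, List.getLast_eq_getElem,
        PySem.List.pyGetD_eq_getElem _ 0 (by omega) (by rw [hlens']; push_cast; omega)]
    have hidx : ((PySem.List.sorted (p ++ [x]) (fun a => a) false).take k.toNat).length - 1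
        = (k - 1).toNat := by rw [hlen2]; omega
    simp only [List.getElem_take, hidx]

lemma stepA_eval (k : Int) (p tmp res : List Int) (x : Int) (hperm : tmp.Perm p) :
    stepA k (res, tmp) ((p.length : Int), x)
      = if (p.length : Int) < k - 1 then (res ++ [(-1 : Int)], tmp ++ [x])
        else (res ++ [PySem.List.pyGetD (PySem.List.sorted (p ++ [x]) (fun a => a) false) (k - 1) 0],
              PySem.List.sorted (p ++ [x]) (fun a => a) false) := by
  have hsort : PySem.List.sorted (tmp ++ [x]) (fun a => a) false
      = PySem.List.sorted (p ++ [x]) (fun a => a) false :=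
    PySem.List.sorted_eq_sorted_of_perm _ _ _ (fun a b h => h) (hperm.append_right [x])
  by_cases hc : (p.length : Int) < k - 1 <;> simp [stepA, hc, hsort]

lemma main_lemma (k : Int) (hk : 1 ≤ k) :
    ∀ (xs p tmp res : List Int), tmp.Perm p →
    ((PySem.List.enumerate xs (p.length : Int)).foldl (stepA k) (res, tmp)).1
      = ((xs.foldl (stepB k) ((PySem.List.sorted p (fun a => a) false).take k.toNat, res)).2) := by
  intro xs
  induction xs with
  | nil => intro p tmp res _; simp [PySem.List.enumerate_nil]
  | cons x t ih =>
    intro p tmp res hperm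
    rw [PySem.List.enumerate_cons, List.foldl_cons, List.foldl_cons,
        stepA_eval k p tmp res x hperm, stepB_eval k hk p res x]
    by_cases hc : (p.length : Int) < k - 1
    · rw [if_pos hc, if_pos hc]
      have := ih (p ++ [x]) (tmp ++ [x]) (res ++ [(-1 : Int)]) (hperm.append_right [x])
      simpa [List.length_append] using this
    · rw [if_neg hc, if_neg hc]
      have := ih (p ++ [x]) (PySem.List.sorted (p ++ [x]) (fun a => a) false)
        (res ++ [PySem.List.pyGetD (PySem.List.sorted (p ++ [x]) (fun a => a) false) (k - 1) 0])
        (PySem.List.sorted_perm _ _ _)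
      simpa [List.length_append] using this

lemma findKth_eq_enum (myInput : List Int) (k : Int) :
    findKth myInput k = ((PySem.List.enumerate myInput 0).foldl (stepA k) ([], [])).1 := by
  unfold findKth
  rw [PySem.List.enumerate_eq_map_pyRange myInput 0, List.foldl_map]

lemma allNeg (k : Int) : ∀ (xs : List Int) (i : Int) (res tmp : List Int),
    i + xs.length ≤ k - 1 →
    ((PySem.List.enumerate xs i).foldl (stepA k) (res, tmp)).1
      = res ++ List.replicate xs.length (-1) := by
  intro xs
  induction xs with
  | nil => intro i res tmp _; simp [PySem.List.enumerate_nil]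
  | cons y t ih =>
    intro i res tmp hle
    rw [PySem.List.enumerate_cons, List.foldl_cons]
    have hi : i < k - 1 := by simp at hle; omega
    have : stepA k (res, tmp) (i, y) = (res ++ [(-1 : Int)], tmp ++ [y]) := by
      simp [stepA, hi]
    rw [this, ih (i + 1) _ _ (by simp at hle ⊢; omega)]
    simp [List.replicate_succ]

-- ===== VERDICT (by name: the statement is the Claim_ definition above) =====
theorem findKth_spec : Claim_equal_findKth := by
  intro myInput k _ hpre
  unfold Spec_findKth findKth_alt
  by_cases hkn : k > (myInput.length : Int)
  · rw [if_pos hkn, findKth_eq_enum]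
    have := allNeg k myInput 0 [] [] (by omega)
    simpa using this
  · rw [if_neg hkn]
    rcases hpre with hnil | hk
    · subst hnil
      simp [findKth, PySem.List.pyRange_one_eq_nil, PySem.List.len]
    · rw [findKth_eq_enum]
      have := main_lemma k hk myInput [] [] [] (List.Perm.refl [])
      simpa [show PySem.List.sorted ([] : List Int) (fun a => a) false = [] from rfl] using this
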